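-- pv_equiv track=rewrite | github.com/thaynaraCardoso1/LGBT-Minas_Pipeline | src/utils/merge_gcp.py | is_effectively_empty
-- ===== SOURCE A (Python) =====
-- from typing import List, Set, Dict, Any
--
-- SOURCE_COL = "source_file"
--
-- def is_effectively_empty(row: Dict[str, str], source_col: str = SOURCE_COL) -> bool:
--     """
--     Remove linha se:
--     - todas as colunas (exceto source_file) são vazias/espacos
--     - OU se o "conteúdo total" é literalmente "0" (linha lixo muito comum)
--     """
--     vals = []
--     for k, v in row.items():
--         if k == source_col:
--             continue
--         s = (v or "").strip()
--         vals.append(s)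
--
--     # tudo vazio
--     if all(v == "" for v in vals):
--         return True
--
--     # "só 0" (ex: linha com um único token 0)
--     joined = "".join(vals).strip()
--     if joined == "0":
--         return True
--
--     return False
-- ===== SOURCE B (Python) =====
-- SOURCE_COL = "source_file"
--
-- def is_effectively_empty(row, source_col=SOURCE_COL):
--     # Early-exit state machine: scan the row once keeping only a flag.
--     # The row is effectively empty iff every non-source value strips to ""
--     # except at most one, which must strip to exactly "0".  Any other
--     # non-empty stripped value, or a second "0", refutes immediately.
--     seen_zero = False
--     for k, v in row.items():
--         if k == source_col:
--             continue
--         s = (v or "").strip()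
--         if s == "":
--             continue
--         if s != "0" or seen_zero:
--             return False
--         seen_zero = True
--     return True
-- ===== Notes on version B (the rewrite author's own statement) =====
-- stated objective: alternative
-- what changed: A materialises the list of stripped values, runs an all-empty pass, then concatenates and re-strips to compare with '0'; B is a single early-exit scan holding only a seen_zero flag (no list, no join): it returns False the moment it meets a non-empty stripped value other than a first '0', True otherwise, using the fact that the stripped concatenation equals '0' iff exactly one value strips to '0' and the rest to ''.
import Mathlib
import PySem

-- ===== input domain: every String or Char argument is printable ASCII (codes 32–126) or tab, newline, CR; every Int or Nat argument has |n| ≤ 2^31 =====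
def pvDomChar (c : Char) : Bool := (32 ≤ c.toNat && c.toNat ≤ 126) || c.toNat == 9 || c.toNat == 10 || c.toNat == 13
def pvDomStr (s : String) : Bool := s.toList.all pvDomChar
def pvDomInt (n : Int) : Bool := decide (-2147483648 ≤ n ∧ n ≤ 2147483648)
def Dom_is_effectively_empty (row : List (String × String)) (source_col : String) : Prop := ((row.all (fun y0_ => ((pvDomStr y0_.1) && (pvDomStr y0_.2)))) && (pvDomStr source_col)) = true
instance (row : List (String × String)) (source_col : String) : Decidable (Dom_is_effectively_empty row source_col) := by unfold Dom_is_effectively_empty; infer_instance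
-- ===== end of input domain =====

-- B replaces A's build-list / all-empty pass / join-and-strip comparison with a single
-- early-exit scan keeping only a seen_zero flag — objective: alternative (no list, no join).

-- ===== PORT A =====
def is_effectively_empty (row : List (String × String)) (source_col : String) : Bool :=
  let vals := row.foldl (fun acc kv =>
    if kv.1 == source_col then acc
    else acc ++ [PySem.Str.strip (if kv.2 == "" then "" else kv.2)]) []
  if vals.all (fun v => v == "") then true
  else if PySem.Str.strip (PySem.Str.join "" vals) == "0" then true
  else false

-- ===== PORT B =====
-- B's loop with early `return False` and the seen_zero flag, as structural recursion.
def pvScanRow (source_col : String) (seen_zero : Bool) : List (String × String) → Bool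
  | [] => true
  | kv :: t =>
    if kv.1 == source_col then pvScanRow source_col seen_zero t
    else
      let s := PySem.Str.strip (if kv.2 == "" then "" else kv.2)
      if s == "" then pvScanRow source_col seen_zero t
      else if s != "0" || seen_zero then false
      else pvScanRow source_col true t

def is_effectively_empty_alt (row : List (String × String)) (source_col : String) : Bool :=
  pvScanRow source_col false row

-- ===== PRECONDITION & SPEC =====
def Spec_is_effectively_empty (row : List (String × String)) (source_col : String) (out : Bool) : Prop := out = is_effectively_empty_alt row source_col
instance (row : List (String × String)) (source_col : String) (out : Bool) : Decidable (Spec_is_effectively_empty row source_col out) := by unfold Spec_is_effectively_empty; infer_instance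

-- ===== CLAIM (what is proved, stated in full; the proofs are below) =====
def Claim_equal_is_effectively_empty : Prop := ∀ (row : List (String × String)) (source_col : String), Dom_is_effectively_empty row source_col → Spec_is_effectively_empty row source_col (is_effectively_empty row source_col)

-- ===== LEMMAS AND PROOFS =====

-- A's skip-loop builds exactly the filtered-mapped list of stripped values
theorem foldl_skip_eq {α β : Type} (p : α → Bool) (f : α → β) (l : List α) (acc : List β) :
    l.foldl (fun acc x => if p x then acc else acc ++ [f x]) acc
      = acc ++ (l.filter (fun x => !p x)).map f := by
  have hfun : (fun (acc : List β) x => if p x then acc else acc ++ [f x])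
      = (fun acc x => if (!p x) then acc ++ [f x] else acc) := by
    funext a x; cases p x <;> simp
  rw [hfun, PySem.List.foldl_append_if]

-- proof-only string-level version of B's scan
def pvValScan (seen : Bool) : List String → Bool
  | [] => true
  | v :: t =>
    if v == "" then pvValScan seen t
    else if v != "0" || seen then false
    else pvValScan true t

theorem scanRow_eq_valScan (sc : String) (seen : Bool) (rows : List (String × String)) :
    pvScanRow sc seen rows
      = pvValScan seen ((rows.filter (fun kv => !(kv.1 == sc))).map
          (fun kv => PySem.Str.strip (if kv.2 == "" then "" else kv.2))) := by
  induction rows generalizing seen with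
  | nil => rfl
  | cons kv t ih =>
    by_cases h : kv.1 == sc
    · simp [pvScanRow, h, ih]
    · simp [pvScanRow, pvValScan, h, ih]

theorem valScan_true (vs : List String) :
    pvValScan true vs = vs.all (fun v => v == "") := by
  induction vs with
  | nil => rfl
  | cons v t ih =>
    by_cases h : v == "" <;> simp [pvValScan, h, ih]

theorem valScan_false (vs : List String) :
    pvValScan false vs
      = (vs.all (fun v => v == "")
          || decide (vs.filter (fun v => !(v == "")) = ["0"])) := by
  induction vs with
  | nil => rfl
  | cons v t ih =>
    by_cases h : v == ""
    · have hv : v = "" := beq_iff_eq.mp h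
      subst hv
      have e1 : pvValScan false ("" :: t) = pvValScan false t := by simp [pvValScan]
      rw [e1, ih]
      simp
    · by_cases h0 : v == "0"
      · have hv : v = "0" := beq_iff_eq.mp h0
        subst hv
        have e1 : pvValScan false ("0" :: t) = pvValScan true t := by simp [pvValScan]
        rw [e1, valScan_true]
        have hA : (("0" : String) :: t).all (fun v => v == "") = false := by simp
        rw [hA, Bool.false_or, List.filter_cons_of_pos (by simp)]
        by_cases hta : ∀ w ∈ t, w = ""
        · have h1 : t.all (fun v => v == "") = true := by
            rw [List.all_eq_true]; intro w hw; exact beq_iff_eq.mpr (hta w hw)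
          have h2 : t.filter (fun v => !(v == "")) = [] := by
            apply List.filter_eq_nil_iff.mpr; intro w hw; simp [hta w hw]
          rw [h1, h2]; simp
        · have h1 : t.all (fun v => v == "") = false := by
            rw [Bool.eq_false_iff]; intro hx
            exact hta (fun w hw => by simpa using List.all_eq_true.mp hx w hw)
          push Not at hta
          obtain ⟨w, hw, hwe⟩ := hta
          have h2 : ¬ (("0" : String) :: t.filter (fun v => !(v == "")) = ["0"]) := by
            intro hx
            have hm : w ∈ t.filter (fun v => !(v == "")) :=
              List.mem_filter.mpr ⟨hw, by simp [hwe]⟩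
            rw [(List.cons_eq_cons.mp hx).2] at hm
            simp at hm
          rw [h1]
          simp [h2]
      · have hb : (v != "0") = true := by
          rw [bne]; simp [h0]
        have e1 : pvValScan false (v :: t) = false := by
          simp only [pvValScan]
          rw [if_neg h, if_pos (by simp [hb])]
        rw [e1]
        have hA : ((v :: t).all fun v => v == "") = false := by simp [h]
        rw [hA, Bool.false_or, List.filter_cons_of_pos (by simp [h])]
        have hx : ¬ (v :: t.filter (fun v => !(v == "")) = ["0"]) := fun hx =>
          h0 (beq_iff_eq.mpr (List.cons_eq_cons.mp hx).1)
        simp [hx]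

-- "".join is flatten on the char level
theorem join_nil_eq_flatten (ls : List (List Char)) : PySem.Chars.join [] ls = ls.flatten := by
  induction ls with
  | nil => rfl
  | cons h t ih => cases t <;> simp_all [PySem.Chars.join, List.intercalate]

-- head of a nonempty dropWhile fails the predicate
theorem dropWhile_head_false {α : Type} (p : α → Bool) (l : List α) (c : α) (t : List α)
    (h : l.dropWhile p = c :: t) : p c = false := by
  induction l with
  | nil => simp at h
  | cons a u ih =>
    by_cases ha : p a
    · rw [List.dropWhile_cons_of_pos ha] at h; exact ih h
    · rw [List.dropWhile_cons_of_neg ha] at h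
      cases h; exact Bool.eq_false_iff.mpr ha

-- dropWhile is idempotent
theorem dropWhile_idem {α : Type} (p : α → Bool) (l : List α) :
    (l.dropWhile p).dropWhile p = l.dropWhile p := by
  cases h : l.dropWhile p with
  | nil => rfl
  | cons c t => rw [List.dropWhile_cons_of_neg (by simp [dropWhile_head_false p l c t h])]

-- a nonempty strip result is dropWhile-fixed at both ends
theorem strip_ends (x v : List Char) (hx : PySem.Chars.strip x = v) (hne : v ≠ []) :
    v.dropWhile PySem.Chars.isspace = v ∧
    v.reverse.dropWhile PySem.Chars.isspace = v.reverse := by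
  simp only [PySem.Chars.strip, PySem.Chars.rstrip, PySem.Chars.lstrip] at hx
  have hrev : v.reverse = (x.dropWhile PySem.Chars.isspace).reverse.dropWhile PySem.Chars.isspace := by
    rw [← hx, List.reverse_reverse]
  constructor
  · -- v is a prefix of dropWhile x, whose head fails isspace
    have hpre : v <+: x.dropWhile PySem.Chars.isspace := by
      have := List.dropWhile_suffix (l := (x.dropWhile PySem.Chars.isspace).reverse)
        (p := PySem.Chars.isspace)
      rw [← hx]
      exact List.reverse_suffix.mp (by simpa using this)
    obtain ⟨s, hs⟩ := hpre
    cases v with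
    | nil => exact absurd rfl hne
    | cons c u =>
      have hcd : x.dropWhile PySem.Chars.isspace = c :: (u ++ s) := by
        rw [← hs]; simp
      have hc : PySem.Chars.isspace c = false :=
        dropWhile_head_false PySem.Chars.isspace x c (u ++ s) hcd
      rw [List.dropWhile_cons_of_neg (by simp [hc])]
  · rw [hrev, dropWhile_idem]

-- rstrip is empty iff everything is whitespace
theorem rstrip_eq_nil_iff (y : List Char) :
    PySem.Chars.rstrip y = [] ↔ ∀ c ∈ y, PySem.Chars.isspace c = true := by
  simp [PySem.Chars.rstrip, List.dropWhile_eq_nil_iff]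

-- a nonempty dropWhile contains an element failing the predicate
theorem exists_not_of_dropWhile_ne_nil {α : Type} (p : α → Bool) (l : List α)
    (h : l.dropWhile p ≠ []) : ∃ c ∈ l.dropWhile p, p c = false := by
  cases hd : l.dropWhile p with
  | nil => exact absurd hd h
  | cons c t => exact ⟨c, by simp, dropWhile_head_false p l c t hd⟩

-- a nonempty strip result contains a non-whitespace char
theorem exists_nonspace_of_strip_ne_nil (cs : List Char) (h : PySem.Chars.strip cs ≠ []) :
    ∃ c ∈ PySem.Chars.strip cs, PySem.Chars.isspace c = false := by
  simp only [PySem.Chars.strip, PySem.Chars.rstrip, PySem.Chars.lstrip] at h ⊢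
  have hne : (cs.dropWhile PySem.Chars.isspace).reverse.dropWhile PySem.Chars.isspace ≠ [] := by
    intro hnil; exact h (by rw [hnil]; rfl)
  obtain ⟨c, hc, hcp⟩ := exists_not_of_dropWhile_ne_nil PySem.Chars.isspace
      (cs.dropWhile PySem.Chars.isspace).reverse hne
  exact ⟨c, List.mem_reverse.mpr hc, hcp⟩

-- strip (v ++ r) = v ++ rstrip r when v is nonempty and dropWhile-fixed at both ends
theorem strip_append (v r : List Char) (hne : v ≠ [])
    (hl : v.dropWhile PySem.Chars.isspace = v)
    (hr : v.reverse.dropWhile PySem.Chars.isspace = v.reverse) :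
    PySem.Chars.strip (v ++ r) = v ++ PySem.Chars.rstrip r := by
  obtain ⟨c, u, rfl⟩ : ∃ c u, v = c :: u := by
    cases v with
    | nil => exact absurd rfl hne
    | cons c u => exact ⟨c, u, rfl⟩
  simp only [PySem.Chars.strip, PySem.Chars.lstrip, PySem.Chars.rstrip]
  rw [List.dropWhile_append, hl, if_neg (by simp)]
  rw [List.reverse_append, List.dropWhile_append]
  by_cases hemp : r.reverse.dropWhile PySem.Chars.isspace = []
  · rw [if_pos (by simp [hemp]), hr, hemp]
    simp
  · rw [if_neg (by simp [hemp])]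
    simp

-- if every char of the flattened stripped values is whitespace, every value is empty
theorem all_empty_of_flatten_space (vals : List String)
    (hv : ∀ v ∈ vals, ∃ x, v = PySem.Str.strip x)
    (hall : ∀ c ∈ (vals.map String.toList).flatten, PySem.Chars.isspace c = true) :
    ∀ v ∈ vals, v = "" := by
  intro v hvm
  by_contra hne
  have hvt : v.toList ≠ [] := fun hx => hne (String.toList_inj.mp (by simpa using hx))
  obtain ⟨x, hx⟩ := hv v hvm
  have hst : PySem.Chars.strip x.toList ≠ [] := by
    rw [hx, PySem.Str.toList_strip] at hvt; exact hvt
  obtain ⟨c, hc, hcp⟩ := exists_nonspace_of_strip_ne_nil x.toList hst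
  have hcm : c ∈ (vals.map String.toList).flatten := by
    refine List.mem_flatten.mpr ⟨v.toList, List.mem_map.mpr ⟨v, hvm, rfl⟩, ?_⟩
    rw [hx, PySem.Str.toList_strip]; exact hc
  rw [hall c hcm] at hcp; exact absurd hcp (by simp)

-- core: the stripped concatenation is "0" iff the non-empty values are exactly ["0"]
theorem strip_flatten_zero_iff (vals : List String)
    (hv : ∀ v ∈ vals, ∃ x, v = PySem.Str.strip x) :
    (PySem.Chars.strip (vals.map String.toList).flatten = ['0'])
      ↔ vals.filter (fun v => !(v == "")) = ["0"] := by
  induction vals with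
  | nil => simp [PySem.Chars.strip, PySem.Chars.lstrip, PySem.Chars.rstrip]
  | cons v t ih =>
    have hvt := hv v (by simp)
    have iht := ih (fun w hw => hv w (by simp [hw]))
    by_cases hve : v = ""
    · subst hve
      simpa [List.filter_cons] using iht
    · have hvl : v.toList ≠ [] := fun hx => hve (String.toList_inj.mp (by simpa using hx))
      obtain ⟨x, hx⟩ := hvt
      have hends := strip_ends x.toList v.toList
        (by rw [hx, PySem.Str.toList_strip]) hvl
      rw [List.map_cons, List.flatten_cons,
        strip_append v.toList _ hvl hends.1 hends.2]
      have hsplit : (v.toList ++ PySem.Chars.rstrip (t.map String.toList).flatten = ['0'])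
          ↔ (v.toList = ['0'] ∧ PySem.Chars.rstrip (t.map String.toList).flatten = []) := by
        cases hvc : v.toList with
        | nil => exact absurd hvc hvl
        | cons c u => simp [and_assoc]
      rw [hsplit, rstrip_eq_nil_iff]
      have hfil : (v :: t).filter (fun v => !(v == "")) = v :: t.filter (fun v => !(v == "")) := by
        simp [hve]
      rw [hfil]
      constructor
      · rintro ⟨h1, h2⟩
        have hvz : v = "0" := String.toList_inj.mp (by simpa using h1)
        have hte : ∀ w ∈ t, w = "" :=
          all_empty_of_flatten_space t (fun w hw => hv w (by simp [hw])) h2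
        rw [hvz, List.filter_eq_nil_iff.mpr (by intro w hw; simp [hte w hw])]
      · intro h
        have hvz : v = "0" := by
          have := List.cons_eq_cons.mp h; exact this.1
        have hte : t.filter (fun v => !(v == "")) = [] := (List.cons_eq_cons.mp h).2
        have hall : ∀ w ∈ t, w = "" := by
          intro w hw
          by_contra hne
          have : w ∈ t.filter (fun v => !(v == "")) :=
            List.mem_filter.mpr ⟨hw, by simp [hne]⟩
          rw [hte] at this; simp at this
        constructor
        · rw [hvz]; rfl
        · intro c hc
          obtain ⟨l, hl, hcl⟩ := List.mem_flatten.mp hc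
          obtain ⟨w, hwm, rfl⟩ := List.mem_map.mp hl
          rw [hall w hwm] at hcl; simp at hcl

-- ===== VERDICT (by name: the statement is the Claim_ definition above) =====
theorem is_effectively_empty_spec : Claim_equal_is_effectively_empty := by
  intro row source_col _
  unfold Spec_is_effectively_empty is_effectively_empty is_effectively_empty_alt
  rw [scanRow_eq_valScan, valScan_false,
    foldl_skip_eq (fun kv => kv.1 == source_col)
      (fun kv => PySem.Str.strip (if kv.2 == "" then "" else kv.2)) row []]
  simp only [List.nil_append]
  set vals := ((row.filter (fun kv => !(kv.1 == source_col))).map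
    (fun kv => PySem.Str.strip (if kv.2 == "" then "" else kv.2))) with hvals
  have hv : ∀ v ∈ vals, ∃ x, v = PySem.Str.strip x := by
    intro v hvm
    obtain ⟨kv, _, rfl⟩ := List.mem_map.mp hvm
    exact ⟨_, rfl⟩
  have hJ : (PySem.Str.strip (PySem.Str.join "" vals)).toList
      = PySem.Chars.strip (vals.map String.toList).flatten := by
    rw [PySem.Str.toList_strip, PySem.Str.toList_join]
    congr 1
    simpa using join_nil_eq_flatten (vals.map String.toList)
  by_cases hall : vals.all (fun v => v == "")
  · simp [hall]
  · simp only [hall, Bool.false_eq_true, if_false, Bool.false_or]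
    have hiff := strip_flatten_zero_iff vals hv
    by_cases h0 : PySem.Str.strip (PySem.Str.join "" vals) == "0"
    · have : PySem.Chars.strip (vals.map String.toList).flatten = ['0'] := by
        rw [← hJ]; simpa using congrArg String.toList (beq_iff_eq.mp h0)
      simp [h0, hiff.mp this]
    · have : ¬ (PySem.Chars.strip (vals.map String.toList).flatten = ['0']) := by
        intro hx
        exact h0 (beq_iff_eq.mpr (String.toList_inj.mp (by rw [hJ, hx]; rfl)))
      simp [h0, hiff.not.mp this]
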